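-- pv_equiv track=rewrite | github.com/sikakente/educative-io-python | algorithms/recursion/all_subarrays.py | generate_sub_arrays
-- ===== SOURCE A (Python) =====
-- def generate_sub_arrays(array):
--     """
--
--     Parameters
--     ----------
--     array : list
--         list of characters or number
--
--     Returns
--     -------
--     list
--         A list of all sub arrays
--
--     """
--     all_sub_arrays = []
--
--     def helper(end):
--         if end == len(array):
--             return
--
--         for start in range(end + 1):
--             all_sub_arrays.append(array[start:end + 1])
--         helper(end + 1)
--
--     helper(0)
--     return all_sub_arrays
-- ===== SOURCE B (Python) =====
-- def generate_sub_arrays(array):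
--     n = len(array)
--     return [array[start:end + 1] for end in range(n) for start in range(end + 1)]
-- ===== Notes on version B (the rewrite author's own statement) =====
-- stated objective: simpler
-- what changed: Replaces the recursive closure mutating an outer list with a single flat comprehension over (end, start) index pairs in the same order.
import Mathlib
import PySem

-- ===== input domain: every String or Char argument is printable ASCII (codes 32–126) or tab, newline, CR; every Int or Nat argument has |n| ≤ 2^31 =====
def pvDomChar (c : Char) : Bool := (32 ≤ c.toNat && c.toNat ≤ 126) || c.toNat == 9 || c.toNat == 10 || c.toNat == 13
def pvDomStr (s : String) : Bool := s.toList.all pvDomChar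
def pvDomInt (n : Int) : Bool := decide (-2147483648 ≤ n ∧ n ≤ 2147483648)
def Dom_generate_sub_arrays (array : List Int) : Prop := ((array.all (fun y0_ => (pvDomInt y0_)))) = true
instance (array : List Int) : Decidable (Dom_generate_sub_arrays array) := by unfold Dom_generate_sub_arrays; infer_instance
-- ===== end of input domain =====

-- B replaces A's recursive closure mutating an outer list with one flat comprehension
-- over (end, start) pairs in the same order (objective: simpler).

-- ===== PORT A =====
-- A's nested recursive helper: 'if end == len(array): return' then the append loop,
-- then the tail call helper(end+1). fuel is only a termination guard (fuel = len+1 suffices).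
def genAHelper (array : List Int) : Nat → Int → List (List Int) → List (List Int)
  | 0, _, acc => acc
  | fuel+1, e, acc =>
    if e = (array.length : Int) then acc
    else genAHelper array fuel (e+1)
      ((PySem.List.pyRange 0 (e+1) 1).foldl
        (fun a s => a ++ [PySem.List.slice array (some s) (some (e+1))]) acc)

def generate_sub_arrays (array : List Int) : List (List Int) :=
  genAHelper array (array.length + 1) 0 []

-- ===== PORT B =====
def generate_sub_arrays_alt (array : List Int) : List (List Int) :=
  (List.range array.length).flatMap (fun e =>
    (List.range (e + 1)).map (fun (s : Nat) =>
      PySem.List.slice array (some (s : Int)) (some ((e : Int) + 1))))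

-- ===== PRECONDITION & SPEC =====
def Spec_generate_sub_arrays (array : List Int) (out : List (List Int)) : Prop := out = generate_sub_arrays_alt array
instance (array : List Int) (out : List (List Int)) : Decidable (Spec_generate_sub_arrays array out) := by unfold Spec_generate_sub_arrays; infer_instance

-- ===== CLAIM (what is proved, stated in full; the proofs are below) =====
def Claim_equal_generate_sub_arrays : Prop := ∀ (array : List Int), Dom_generate_sub_arrays array → Spec_generate_sub_arrays array (generate_sub_arrays array)

-- ===== LEMMAS AND PROOFS =====

theorem foldl_append_singleton {α β : Type} (f : α → β) :
    ∀ (l : List α) (acc : List β),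
      l.foldl (fun a s => a ++ [f s]) acc = acc ++ l.map f := by
  intro l
  induction l with
  | nil => simp
  | cons x xs ih => intro acc; simp [List.foldl, ih]

theorem genAHelper_eq (array : List Int) :
    ∀ (fuel e : Nat) (acc : List (List Int)),
      e ≤ array.length → array.length ≤ e + fuel →
      genAHelper array fuel (e : Int) acc =
        acc ++ (List.range' e (array.length - e)).flatMap (fun i =>
          (List.range (i + 1)).map (fun (s : Nat) =>
            PySem.List.slice array (some (s : Int)) (some ((i : Int) + 1)))) := by
  intro fuel
  induction fuel with
  | zero =>
    intro e acc h1 h2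
    have : array.length - e = 0 := by omega
    simp [genAHelper, this]
  | succ fuel ih =>
    intro e acc h1 h2
    by_cases he : e = array.length
    · have : array.length - e = 0 := by omega
      simp [genAHelper, he]
    · have hlt : e < array.length := by omega
      have hne : (e : Int) ≠ (array.length : Int) := by
        exact_mod_cast he
      rw [genAHelper, if_neg hne]
      have hr : PySem.List.pyRange 0 ((e : Int) + 1) 1 =
          (List.range (e + 1)).map (fun (k : Nat) => ((k : Int))) := by
        rw [PySem.List.pyRange_one]
        have : (((e : Int) + 1) - 0).toNat = e + 1 := by omega
        rw [this]
        simp only [zero_add]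
      rw [hr, foldl_append_singleton]
      have hcast : (e : Int) + 1 = ((e + 1 : Nat) : Int) := by push_cast; ring
      rw [hcast, ih (e + 1) _ (by omega) (by omega)]
      have hsplit : array.length - e = (array.length - (e + 1)) + 1 := by omega
      rw [hsplit, List.range'_succ, List.flatMap_cons, List.map_map,
        ← List.append_assoc]
      congr 2

theorem generate_sub_arrays_eq (array : List Int) :
    generate_sub_arrays array = generate_sub_arrays_alt array := by
  unfold generate_sub_arrays generate_sub_arrays_alt
  have h := genAHelper_eq array (array.length + 1) 0 [] (by omega) (by omega)
  simpa [List.range_eq_range'] using h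

-- ===== VERDICT (by name: the statement is the Claim_ definition above) =====
theorem generate_sub_arrays_spec : Claim_equal_generate_sub_arrays := by
  intro array _
  exact generate_sub_arrays_eq array
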